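-- pv_equiv track=rewrite | github.com/mccarvik/python_for_finance | research/res_utils.py | is_replacements
-- ===== SOURCE A (Python) =====
-- def is_replacements(headers):
--     first = False
--     new_headers = []
--     for h in headers:
--         if not first:
--             if h == 'Basic':
--                 new_headers.append('EPS' + h)
--             else:
--                 if h == 'Diluted':
--                     new_headers.append('EPS' + h)
--                     first = True
--                 else:
--                     new_headers.append(h)
--         else:
--             if h == 'Basic':
--                 new_headers.append('Shares' + h)
--             else:
--                 if h == 'Diluted':
--                     new_headers.append('Shares' + h)
--                 else:
--                     new_headers.append(h)
--     return new_headers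
-- ===== SOURCE B (Python) =====
-- def is_replacements(headers):
--     if 'Diluted' in headers:
--         p = headers.index('Diluted') + 1
--     else:
--         p = len(headers)
--     eps = ['EPS' + h if h in ('Basic', 'Diluted') else h for h in headers[:p]]
--     shares = ['Shares' + h if h in ('Basic', 'Diluted') else h for h in headers[p:]]
--     return eps + shares
-- ===== Notes on version B (the rewrite author's own statement) =====
-- stated objective: alternative
-- what changed: Replaces the mutable first-Diluted flag state machine with a precomputed pivot (index of the first 'Diluted'), splitting the list at pivot+1 and mapping the 'EPS' prefix over the front part and the 'Shares' prefix over the back part.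
import Mathlib
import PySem

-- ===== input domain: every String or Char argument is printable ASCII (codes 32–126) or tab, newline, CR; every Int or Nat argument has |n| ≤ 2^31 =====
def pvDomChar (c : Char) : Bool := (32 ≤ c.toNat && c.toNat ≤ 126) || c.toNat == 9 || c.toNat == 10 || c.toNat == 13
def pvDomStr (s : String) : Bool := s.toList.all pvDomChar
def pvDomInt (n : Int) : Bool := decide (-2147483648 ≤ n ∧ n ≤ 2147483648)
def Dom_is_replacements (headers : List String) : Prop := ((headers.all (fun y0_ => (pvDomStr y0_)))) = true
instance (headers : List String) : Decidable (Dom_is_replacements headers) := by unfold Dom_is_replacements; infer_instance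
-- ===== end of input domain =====

-- B replaces A's mutable first-Diluted flag with a precomputed pivot index and two mapping passes (alternative decomposition, same cost).

-- ===== PORT A =====
-- A's loop with the 'first' flag, as structural recursion over the list carrying the flag.
def isReplGo (first : Bool) : List String → List String
  | [] => []
  | h :: t =>
    if first = false then
      if h = "Basic" then ("EPS" ++ h) :: isReplGo false t
      else if h = "Diluted" then ("EPS" ++ h) :: isReplGo true t
      else h :: isReplGo false t
    else
      if h = "Basic" then ("Shares" ++ h) :: isReplGo true t
      else if h = "Diluted" then ("Shares" ++ h) :: isReplGo true t
      else h :: isReplGo true t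

def is_replacements (headers : List String) : List String := isReplGo false headers

-- ===== PORT B =====
def is_replacements_alt (headers : List String) : List String :=
  let p : Nat :=
    match PySem.List.index? headers "Diluted" with
    | some i => i + 1
    | none => headers.length
  let eps := (headers.take p).map (fun h => if h = "Basic" ∨ h = "Diluted" then "EPS" ++ h else h)
  let shares := (headers.drop p).map (fun h => if h = "Basic" ∨ h = "Diluted" then "Shares" ++ h else h)
  eps ++ shares

-- ===== PRECONDITION & SPEC =====
def Spec_is_replacements (headers : List String) (out : List String) : Prop := out = is_replacements_alt headers
instance (headers : List String) (out : List String) : Decidable (Spec_is_replacements headers out) := by unfold Spec_is_replacements; infer_instance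

-- ===== CLAIM (what is proved, stated in full; the proofs are below) =====
def Claim_equal_is_replacements : Prop := ∀ (headers : List String), Dom_is_replacements headers → Spec_is_replacements headers (is_replacements headers)

-- ===== LEMMAS AND PROOFS =====
theorem isReplGo_true (l : List String) :
    isReplGo true l = l.map (fun h => if h = "Basic" ∨ h = "Diluted" then "Shares" ++ h else h) := by
  induction l with
  | nil => rfl
  | cons h t ih =>
    simp only [isReplGo, List.map]
    by_cases hb : h = "Basic" <;> by_cases hd : h = "Diluted" <;> simp [hb, hd, ih]

theorem isReplGo_false (l : List String) : isReplGo false l = is_replacements_alt l := by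
  induction l with
  | nil => rfl
  | cons h t ih =>
    by_cases hd : h = "Diluted"
    · subst hd
      simp only [is_replacements_alt]
      rw [PySem.List.index?_cons_self]
      simp [isReplGo, isReplGo_true]
    · by_cases hb : h = "Basic"
      · subst hb
        simp only [isReplGo, if_true]
        rw [ih]
        simp only [is_replacements_alt]
        rw [PySem.List.index?_cons_of_ne t (by decide)]
        cases hix : PySem.List.index? t "Diluted" <;>
          simp [List.take_succ_cons, List.drop_succ_cons]
      · simp only [isReplGo, if_neg hb, if_neg hd, if_true]
        rw [ih]
        simp only [is_replacements_alt]
        rw [PySem.List.index?_cons_of_ne t hd]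
        cases hix : PySem.List.index? t "Diluted" <;>
          simp [List.take_succ_cons, List.drop_succ_cons, hb, hd]

-- ===== VERDICT (by name: the statement is the Claim_ definition above) =====
theorem is_replacements_spec : Claim_equal_is_replacements := by
  intro headers _
  show is_replacements headers = is_replacements_alt headers
  exact isReplGo_false headers
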